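-- pv_equiv track=rewrite | github.com/kistaulova05-ai/Primer1 | main.py | _resettable_fails
-- ===== SOURCE A (Python) =====
-- def _resettable_fails(success_series):
--     counts, count = [], 0
--     for s in success_series:
--         if s:
--             count = 0
--         else:
--             count += 1
--         counts.append(count)
--     return counts
-- ===== SOURCE B (Python) =====
-- def _resettable_fails(success_series):
--     series = list(success_series)
--     out = []
--     i, n = 0, len(series)
--     while i < n:
--         j = i
--         while j < n and bool(series[j]) == bool(series[i]):
--             j += 1
--         k = j - i
--         out += [0] * k if series[i] else list(range(1, k + 1))
--         i = j
--     return out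
-- ===== Notes on version B (the rewrite author's own statement) =====
-- stated objective: alternative
-- what changed: Segments the series into maximal runs of equal truth value and emits each run's answers in closed form ([0]*k for a success run, 1..k for a failure run), instead of updating a per-element running counter.
import Mathlib
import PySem

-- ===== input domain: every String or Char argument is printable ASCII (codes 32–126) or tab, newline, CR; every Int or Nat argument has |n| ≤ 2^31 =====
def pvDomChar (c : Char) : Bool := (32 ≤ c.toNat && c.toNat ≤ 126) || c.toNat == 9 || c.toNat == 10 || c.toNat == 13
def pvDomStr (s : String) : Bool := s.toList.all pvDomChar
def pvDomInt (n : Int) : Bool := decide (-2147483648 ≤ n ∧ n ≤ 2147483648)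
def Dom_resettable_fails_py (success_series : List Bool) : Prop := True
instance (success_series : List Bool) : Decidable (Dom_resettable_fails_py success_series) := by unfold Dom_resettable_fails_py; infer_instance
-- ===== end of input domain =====

-- B segments the series into maximal runs and emits each run's answers in closed form
-- ([0]*k for a success run, 1..k for a failure run), instead of a per-element running counter; same cost.

-- ===== PORT A =====
-- loop with state (counts, count), appending the updated count each step
def resettable_fails_py (success_series : List Bool) : List Int :=
  (success_series.foldl
    (fun st s =>
      let count := if s then 0 else st.2 + 1
      (st.1 ++ [count], count))
    (([] : List Int), (0 : Int))).1

-- ===== PORT B =====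
-- inner while loop: length of the maximal prefix of rest equal to b
def pvRunLen (b : Bool) : List Bool → Nat
  | [] => 0
  | s :: rest => if s = b then pvRunLen b rest + 1 else 0

-- outer while loop: split off the first maximal run, emit its answers in closed form, recurse
def resettable_fails_py_alt : List Bool → List Int
  | [] => []
  | s :: rest =>
      let k := pvRunLen s rest + 1
      (if s then List.replicate k (0 : Int)
       else (List.range k).map (fun (i : Nat) => (i : Int) + 1))
        ++ resettable_fails_py_alt (rest.drop (pvRunLen s rest))
termination_by xs => xs.length
decreasing_by
  simp only [List.length_drop, List.length_cons]
  omega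

-- ===== PRECONDITION & SPEC =====
def Spec_resettable_fails_py (success_series : List Bool) (out : List Int) : Prop := out = resettable_fails_py_alt success_series
instance (success_series : List Bool) (out : List Int) : Decidable (Spec_resettable_fails_py success_series out) := by unfold Spec_resettable_fails_py; infer_instance

-- ===== CLAIM (what is proved, stated in full; the proofs are below) =====
def Claim_equal_resettable_fails_py : Prop := ∀ (success_series : List Bool), Dom_resettable_fails_py success_series → Spec_resettable_fails_py success_series (resettable_fails_py success_series)

-- ===== LEMMAS AND PROOFS =====

-- reference scan: A's running counter as a recursion
def pvScan (c : Int) : List Bool → List Int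
  | [] => []
  | s :: rest =>
      let a := if s then 0 else c + 1
      a :: pvScan a rest

-- c+1, c+2, …, c+k
def pvRamp (c : Int) : Nat → List Int
  | 0 => []
  | k + 1 => (c + 1) :: pvRamp (c + 1) k

theorem pv_foldl_scan (xs : List Bool) : ∀ (counts : List Int) (count : Int),
    (xs.foldl
      (fun st s =>
        let c := if s then 0 else st.2 + 1
        (st.1 ++ [c], c))
      (counts, count)).1 = counts ++ pvScan count xs := by
  induction xs with
  | nil => intro counts count; simp [pvScan]
  | cons s rest ih =>
    intro counts count
    simp only [List.foldl, pvScan]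
    rw [ih]
    simp

-- after dropping the maximal run of b, the head (if any) differs from b
theorem pv_drop_run_head (b : Bool) (l : List Bool) :
    ∀ x t, l.drop (pvRunLen b l) = x :: t → x ≠ b := by
  induction l with
  | nil => intro x t h; simp at h
  | cons s rest ih =>
    intro x t h
    by_cases hs : s = b
    · simp [pvRunLen, hs] at h
      exact ih x t h
    · simp [pvRunLen, hs] at h
      exact h.1 ▸ hs

-- scan over the maximal leading run of trues: zeros, counter stays 0
theorem pv_scan_true_run (l : List Bool) :
    pvScan 0 l = List.replicate (pvRunLen true l) 0 ++ pvScan 0 (l.drop (pvRunLen true l)) := by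
  induction l with
  | nil => simp [pvRunLen]
  | cons s rest ih =>
    by_cases hs : s = true
    · subst hs
      simp only [pvRunLen, pvScan]
      simp [ih, List.replicate_succ]
    · simp [pvRunLen, hs]

-- scan over the maximal leading run of falses: c+1, …, c+k, counter ends at c+k
theorem pv_scan_false_run (l : List Bool) : ∀ (c : Int),
    pvScan c l = pvRamp c (pvRunLen false l)
      ++ pvScan (c + pvRunLen false l) (l.drop (pvRunLen false l)) := by
  induction l with
  | nil => intro c; simp [pvRunLen, pvRamp]
  | cons s rest ih =>
    intro c
    by_cases hs : s = false
    · subst hs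
      have hk : pvRunLen false (false :: rest) = pvRunLen false rest + 1 := by
        simp [pvRunLen]
      rw [hk]
      simp only [pvScan, pvRamp, List.drop_succ_cons, Bool.false_eq_true, if_false,
        List.cons_append]
      rw [ih (c + 1)]
      have : c + 1 + (pvRunLen false rest : Int) = c + ((pvRunLen false rest : Int) + 1) := by
        ring
      rw [this]
      push_cast
      ring_nf
    · simp [pvRunLen, pvRamp, hs]

-- pvRamp from 0 is 1..k, i.e. B's closed-form failure-run output
theorem pv_ramp_range : ∀ (k : Nat) (c : Int),
    pvRamp c k = (List.range k).map (fun (i : Nat) => c + (i : Int) + 1) := by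
  intro k
  induction k with
  | zero => intro c; simp [pvRamp]
  | succ m ih =>
    intro c
    rw [pvRamp, ih (c + 1), List.range_succ_eq_map, List.map_cons, List.map_map]
    congr 1
    · simp
    · apply List.map_congr_left
      intro i _
      simp [Function.comp]
      push_cast
      ring

-- the scan's accumulator is irrelevant when the list does not start with false
theorem pv_scan_reset (c : Int) (l : List Bool) (h : ∀ x t, l = x :: t → x ≠ false) :
    pvScan c l = pvScan 0 l := by
  cases l with
  | nil => rfl
  | cons x t =>
    have hx : x = true := by
      cases x
      · exact absurd rfl (h false t rfl)
      · rfl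
    subst hx
    simp [pvScan]

-- B computes A's scan
theorem pv_alt_eq_scan : ∀ (n : Nat) (xs : List Bool), xs.length ≤ n →
    resettable_fails_py_alt xs = pvScan 0 xs := by
  intro n
  induction n with
  | zero =>
    intro xs h
    have hnil : xs = [] := List.eq_nil_of_length_eq_zero (Nat.le_zero.mp h)
    subst hnil
    rw [resettable_fails_py_alt, pvScan]
  | succ m ih =>
    intro xs h
    cases xs with
    | nil => rw [resettable_fails_py_alt, pvScan]
    | cons s rest =>
      have hlen : (rest.drop (pvRunLen s rest)).length ≤ m := by
        simp only [List.length_drop]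
        simp at h
        omega
      rw [resettable_fails_py_alt]
      cases s
      · -- failure run: closed-form 1..k
        have hrun := pv_scan_false_run (false :: rest) 0
        have hk : pvRunLen false (false :: rest) = pvRunLen false rest + 1 := by
          simp [pvRunLen]
        rw [hrun, hk]
        simp only [List.drop_succ_cons]
        rw [pv_scan_reset _ _ (fun x t hx => pv_drop_run_head false rest x t hx),
            ih _ hlen, pv_ramp_range]
        simp
      · -- success run: zeros
        have hrun := pv_scan_true_run (true :: rest)
        have hk : pvRunLen true (true :: rest) = pvRunLen true rest + 1 := by
          simp [pvRunLen]
        rw [hrun, hk]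
        simp only [List.drop_succ_cons]
        rw [ih _ hlen]
        simp

-- ===== VERDICT (by name: the statement is the Claim_ definition above) =====
theorem resettable_fails_py_spec : Claim_equal_resettable_fails_py := by
  intro xs _
  unfold Spec_resettable_fails_py resettable_fails_py
  rw [pv_foldl_scan, pv_alt_eq_scan xs.length xs (Nat.le_refl _)]
  simp
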